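-- pv_equiv track=rewrite | github.com/pinotronic/LimpiandoTexto | Proceso.py | cambiandoBullets
-- ===== SOURCE A (Python) =====
-- def cambiandoBullets(CambiandolosPuntos):
--         CambiandolosPuntos = CambiandolosPuntos +"XXXX"
--
--         Casilla4 = ""
--         Casilla3 = ""
--         Casilla2 = ""
--         Casilla1 = ""
--         TextoFinal =""
--
--         for letra in CambiandolosPuntos:
--
--             Final = Casilla4
--             Casilla4 = Casilla3
--             Casilla3 = Casilla2
--             Casilla2 = Casilla1
--             Casilla1 = letra
--             # \n . " " M
--             if Casilla4 == "\n" and Casilla3 == "." and Casilla2 == " " and Casilla1.isupper() == True :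
--                 Casilla3 = Casilla3.replace('.', '•')
--                 TextoFinal = TextoFinal +Final
--                 # \n o " " M
--             elif Casilla4 == "\n" and Casilla3 == "o" and Casilla2 == " " and Casilla1.isupper() == True :
--                 Casilla3 = Casilla3.replace('o', '•')
--                 TextoFinal = TextoFinal +Final
--                 # \n - " " M
--             elif Casilla4 == "\n" and Casilla3 == "-" and Casilla2 == " " and Casilla1.isupper() == True :
--                 Casilla3 = Casilla3.replace('-', '•')
--                 TextoFinal = TextoFinal + Final
--             elif Casilla4 == "\n" and Casilla3 == "*" and Casilla2 == " " and Casilla1.isupper() == True :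
--                 Casilla3 = Casilla3.replace('*', '•')
--                 TextoFinal = TextoFinal + Final
--                 # m " " \n \n
--             elif Casilla4.islower() == True and Casilla3 == " " and Casilla2 == "\n" and Casilla1 == "\n" :
--                 Casilla3 = Casilla3.replace(' ', '.\n')
--                 TextoFinal = TextoFinal + Final
--             elif Casilla4.islower() == True and Casilla3 == "." and Casilla2.isupper() == True  and Casilla1.islower() == True :
--                 Casilla3 = Casilla3.replace('.', '. ')
--                 Casilla3 = ". "
--                 TextoFinal = TextoFinal + Final
--             else:
--                 TextoFinal = TextoFinal + Final
--
--
--         return TextoFinal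
-- ===== SOURCE B (Python) =====
-- def cambiandoBullets(CambiandolosPuntos):
--     lines = (CambiandolosPuntos + "XXXX").split('\n')
--     res = []
--     for i, line in enumerate(lines):
--         if i > 0 and line[:2] in ('. ', 'o ', '- ', '* ') and line[2:3].isupper():
--             line = '\u2022' + line[1:]
--         line = ''.join('. ' if (0 < j and line[j - 1:j].islower() and ch == '.'
--                                 and line[j + 1:j + 2].isupper() and line[j + 2:j + 3].islower())
--                        else ch
--                        for j, ch in enumerate(line))
--         if i + 1 < len(lines) and lines[i + 1] == '' and line.endswith(' ') and line[-2:-1].islower():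
--             line = line[:-1] + '.\n'
--         res.append(line)
--     return '\n'.join(res)[:-4]
-- ===== Notes on version B (the rewrite author's own statement) =====
-- stated objective: alternative
-- what changed: B splits the padded text into lines and repairs each line locally (a bullet fix at the line head, a one-shot period-spacing map inside the line, a sentence-dot fix at the line end driven by whether the next line is empty) before rejoining, instead of A's single stateful pass over characters with a 5-cell shift register, 2-step emission lag and in-place cell mutation.
import Mathlib
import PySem

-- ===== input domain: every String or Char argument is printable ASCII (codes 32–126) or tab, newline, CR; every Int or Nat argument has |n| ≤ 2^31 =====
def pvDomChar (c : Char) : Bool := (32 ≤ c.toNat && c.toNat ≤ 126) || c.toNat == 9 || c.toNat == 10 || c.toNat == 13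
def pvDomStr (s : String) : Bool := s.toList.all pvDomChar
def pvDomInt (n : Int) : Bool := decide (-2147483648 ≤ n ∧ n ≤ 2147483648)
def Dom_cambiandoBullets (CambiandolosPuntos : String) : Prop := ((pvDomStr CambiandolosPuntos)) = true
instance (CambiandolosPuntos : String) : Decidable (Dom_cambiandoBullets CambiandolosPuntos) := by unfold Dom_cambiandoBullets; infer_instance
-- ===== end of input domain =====

-- B rebuilds the text line by line (split on '\n', local fixes at the head, inside and end of
-- each line, rejoin) instead of A's single stateful pass with a 5-cell shift register; objective: alternative.

-- ===== PORT A =====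
-- Python str.isupper() / str.islower() on a WHOLE string (A applies them to register cells that
-- may hold "" or a multi-character replacement; B applies them to slices). Hand port, exact on
-- ASCII and on the only non-ASCII character arising here ('•', uncased in Python): at least one
-- cased character and no cased character of the other case. Cased = ASCII letters on this domain.
def pyStrIsupper (cs : List Char) : Bool :=
  cs.any (fun c => PySem.Chars.isupper c || PySem.Chars.islower c) &&
  cs.all (fun c => !PySem.Chars.islower c)

def pyStrIslower (cs : List Char) : Bool :=
  cs.any (fun c => PySem.Chars.isupper c || PySem.Chars.islower c) &&
  cs.all (fun c => !PySem.Chars.isupper c)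

-- one iteration of A's for-loop; state = (Casilla4, Casilla3, Casilla2, Casilla1, TextoFinal)
def stepA (st : List Char × List Char × List Char × List Char × List Char) (letra : Char) :
    List Char × List Char × List Char × List Char × List Char :=
  match st with
  | (casilla4, casilla3, casilla2, casilla1, textoFinal) =>
    let fin := casilla4
    let casilla4 := casilla3
    let casilla3 := casilla2
    let casilla2 := casilla1
    let casilla1 := [letra]
    if casilla4 = ['\n'] ∧ casilla3 = ['.'] ∧ casilla2 = [' '] ∧ pyStrIsupper casilla1 = true then
      (casilla4, PySem.Chars.replace casilla3 ['.'] ['•'], casilla2, casilla1, textoFinal ++ fin)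
    else if casilla4 = ['\n'] ∧ casilla3 = ['o'] ∧ casilla2 = [' '] ∧ pyStrIsupper casilla1 = true then
      (casilla4, PySem.Chars.replace casilla3 ['o'] ['•'], casilla2, casilla1, textoFinal ++ fin)
    else if casilla4 = ['\n'] ∧ casilla3 = ['-'] ∧ casilla2 = [' '] ∧ pyStrIsupper casilla1 = true then
      (casilla4, PySem.Chars.replace casilla3 ['-'] ['•'], casilla2, casilla1, textoFinal ++ fin)
    else if casilla4 = ['\n'] ∧ casilla3 = ['*'] ∧ casilla2 = [' '] ∧ pyStrIsupper casilla1 = true then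
      (casilla4, PySem.Chars.replace casilla3 ['*'] ['•'], casilla2, casilla1, textoFinal ++ fin)
    else if pyStrIslower casilla4 = true ∧ casilla3 = [' '] ∧ casilla2 = ['\n'] ∧ casilla1 = ['\n'] then
      (casilla4, PySem.Chars.replace casilla3 [' '] ['.', '\n'], casilla2, casilla1, textoFinal ++ fin)
    else if pyStrIslower casilla4 = true ∧ casilla3 = ['.'] ∧ pyStrIsupper casilla2 = true ∧ pyStrIslower casilla1 = true then
      -- Python does the replace and then overwrites Casilla3 with ". "
      let _casilla3 := PySem.Chars.replace casilla3 ['.'] ['.', ' ']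
      (casilla4, ['.', ' '], casilla2, casilla1, textoFinal ++ fin)
    else
      (casilla4, casilla3, casilla2, casilla1, textoFinal ++ fin)

def cambiandoBullets (CambiandolosPuntos : String) : String :=
  let padded := CambiandolosPuntos.toList ++ "XXXX".toList
  let st := padded.foldl stepA ([], [], [], [], [])
  String.ofList st.2.2.2.2

-- ===== PORT B =====
-- 'if i > 0 and line[:2] in ('. ', 'o ', '- ', '* ') and line[2:3].isupper(): line = '•' + line[1:]'
def bulletFix (i : Int) (line : List Char) : List Char :=
  if 0 < i ∧ PySem.List.slice line none (some 2) ∈ [['.',' '], ['o',' '], ['-',' '], ['*',' ']]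
      ∧ pyStrIsupper (PySem.List.slice line (some 2) (some 3)) = true
  then '•' :: PySem.List.slice line (some 1) none
  else line

-- the comprehension body: '. ' if 0<j and line[j-1:j].islower() and ch=='.' and line[j+1:j+2].isupper() and line[j+2:j+3].islower() else ch
def spacePiece (line : List Char) (j : Int) (ch : Char) : List Char :=
  if 0 < j ∧ pyStrIslower (PySem.List.slice line (some (j-1)) (some j)) = true ∧ ch = '.'
      ∧ pyStrIsupper (PySem.List.slice line (some (j+1)) (some (j+2))) = true
      ∧ pyStrIslower (PySem.List.slice line (some (j+2)) (some (j+3))) = true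
  then ['.', ' '] else [ch]

-- line = ''.join(<piece> for j, ch in enumerate(line))
def spaceFix (line : List Char) : List Char :=
  ((PySem.List.enumerate line).map (fun p => spacePiece line p.1 p.2)).flatten

-- 'if i+1 < len(lines) and lines[i+1] == '' and line.endswith(' ') and line[-2:-1].islower(): line = line[:-1] + '.\n''
def breakFix (lines : List (List Char)) (i : Int) (line : List Char) : List Char :=
  if i + 1 < (lines.length : Int) ∧ PySem.List.pyGet? lines (i + 1) = some ([] : List Char)
      ∧ PySem.Chars.endswith line [' '] = true
      ∧ pyStrIslower (PySem.List.slice line (some (-2)) (some (-1))) = true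
  then PySem.List.slice line none (some (-1)) ++ ['.', '\n']
  else line

def cambiandoBullets_alt (CambiandolosPuntos : String) : String :=
  let t := CambiandolosPuntos.toList ++ "XXXX".toList
  let lines := PySem.Chars.splitOn t ['\n']
  let res := (PySem.List.enumerate lines).map
    (fun p => breakFix lines p.1 (spaceFix (bulletFix p.1 p.2)))
  String.ofList (PySem.List.slice (PySem.Chars.join ['\n'] res) none (some (-4)))

-- ===== PRECONDITION & SPEC =====
def Spec_cambiandoBullets (CambiandolosPuntos : String) (out : String) : Prop := out = cambiandoBullets_alt CambiandolosPuntos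
instance (CambiandolosPuntos : String) (out : String) : Decidable (Spec_cambiandoBullets CambiandolosPuntos out) := by unfold Spec_cambiandoBullets; infer_instance

-- ===== CLAIM (what is proved, stated in full; the proofs are below) =====
def Claim_equal_cambiandoBullets : Prop := ∀ (CambiandolosPuntos : String), Dom_cambiandoBullets CambiandolosPuntos → Spec_cambiandoBullets CambiandolosPuntos (cambiandoBullets CambiandolosPuntos)

-- ===== LEMMAS AND PROOFS =====


-- ---------- the fused per-position rule, and port A reduced to it ----------

-- B's three tests fused into one per-position rule over the raw neighbours
def ruleR (left : List Char) (c r1 r2 : Char) : List Char :=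
  if left = ['\n'] ∧ c ∈ ['.', 'o', '-', '*'] ∧ r1 = ' ' ∧ PySem.Chars.isupper r2 = true then
    ['•']
  else if pyStrIslower left = true ∧ c = ' ' ∧ r1 = '\n' ∧ r2 = '\n' then
    ['.', '\n']
  else if pyStrIslower left = true ∧ c = '.' ∧ PySem.Chars.isupper r1 = true ∧ PySem.Chars.islower r2 = true then
    ['.', ' ']
  else
    [c]

-- the output piece contributed by position j of the padded text
def procB (padded : List Char) (j : Nat) : List Char :=
  let left : List Char := if j = 0 then [] else [padded.getD (j - 1) 'X']
  let c := padded.getD j 'X'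
  let r1 := padded.getD (j + 1) 'X'
  let r2 := padded.getD (j + 2) 'X'
  ruleR left c r1 r2

-- the value A's branch cascade stores into Casilla3, isolated
def mutA (c4 c3 c2 c1 : List Char) : List Char :=
  if c4 = ['\n'] ∧ c3 = ['.'] ∧ c2 = [' '] ∧ pyStrIsupper c1 = true then
    PySem.Chars.replace c3 ['.'] ['•']
  else if c4 = ['\n'] ∧ c3 = ['o'] ∧ c2 = [' '] ∧ pyStrIsupper c1 = true then
    PySem.Chars.replace c3 ['o'] ['•']
  else if c4 = ['\n'] ∧ c3 = ['-'] ∧ c2 = [' '] ∧ pyStrIsupper c1 = true then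
    PySem.Chars.replace c3 ['-'] ['•']
  else if c4 = ['\n'] ∧ c3 = ['*'] ∧ c2 = [' '] ∧ pyStrIsupper c1 = true then
    PySem.Chars.replace c3 ['*'] ['•']
  else if pyStrIslower c4 = true ∧ c3 = [' '] ∧ c2 = ['\n'] ∧ c1 = ['\n'] then
    PySem.Chars.replace c3 [' '] ['.', '\n']
  else if pyStrIslower c4 = true ∧ c3 = ['.'] ∧ pyStrIsupper c2 = true ∧ pyStrIslower c1 = true then
    ['.', ' ']
  else
    c3

lemma stepA_eq (c4 c3 c2 c1 out : List Char) (x : Char) :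
    stepA (c4, c3, c2, c1, out) x = (c3, mutA c3 c2 c1 [x], c1, [x], out ++ c4) := by
  simp only [stepA, mutA]
  split_ifs <;> rfl

lemma procB_eq (P : List Char) (j : Nat) :
    procB P j = ruleR (if j = 0 then [] else [P.getD (j - 1) 'X'])
      (P.getD j 'X') (P.getD (j + 1) 'X') (P.getD (j + 2) 'X') := rfl

-- char-class facts
lemma isupper_ne (c : Char) (h : PySem.Chars.isupper c = true) :
    c ≠ '\n' ∧ c ≠ '.' ∧ c ≠ 'o' ∧ c ≠ '-' ∧ c ≠ '*' ∧ c ≠ ' ' := by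
  simp only [PySem.Chars.isupper, Bool.and_eq_true, decide_eq_true_eq] at h
  refine ⟨?_, ?_, ?_, ?_, ?_, ?_⟩ <;> rintro rfl <;> revert h <;> decide

lemma islower_of_isupper_false (c : Char) (h : PySem.Chars.isupper c = true) :
    PySem.Chars.islower c = false := by
  simp only [PySem.Chars.isupper, PySem.Chars.islower, Bool.and_eq_true, decide_eq_true_eq] at *
  rcases h with ⟨h1, h2⟩
  by_contra hc
  simp only [Bool.not_eq_false, Bool.and_eq_true, decide_eq_true_eq] at hc
  have := hc.1
  have : ('a' : Char) ≤ 'Z' := le_trans this h2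
  revert this; decide

lemma pyStrIsupper_singleton (c : Char) : pyStrIsupper [c] = PySem.Chars.isupper c := by
  simp only [pyStrIsupper, List.any_cons, List.any_nil, List.all_cons, List.all_nil,
    Bool.or_false, Bool.and_true]
  by_cases h : PySem.Chars.isupper c = true
  · simp [h, islower_of_isupper_false c h]
  · simp only [Bool.not_eq_true] at h
    simp [h]

lemma isupper_of_islower_false (c : Char) (h : PySem.Chars.islower c = true) :
    PySem.Chars.isupper c = false := by
  by_contra hc
  simp only [Bool.not_eq_false] at hc
  have := islower_of_isupper_false c hc
  rw [h] at this; exact Bool.false_ne_true this.symm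

lemma pyStrIslower_singleton (c : Char) : pyStrIslower [c] = PySem.Chars.islower c := by
  simp only [pyStrIslower, List.any_cons, List.any_nil, List.all_cons, List.all_nil,
    Bool.or_false, Bool.and_true]
  by_cases h : PySem.Chars.islower c = true
  · simp [h, isupper_of_islower_false c h]
  · simp only [Bool.not_eq_true] at h
    simp [h]

lemma islower_ne (c : Char) (h : PySem.Chars.islower c = true) :
    c ≠ '\n' := by
  simp only [PySem.Chars.islower, Bool.and_eq_true, decide_eq_true_eq] at h
  rintro rfl; revert h; decide

-- the replace calls A makes, evaluated on the literal cells they are applied to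
lemma rep_dot : PySem.Chars.replace ['.'] ['.'] ['•'] = ['•'] := by decide
lemma rep_o : PySem.Chars.replace ['o'] ['o'] ['•'] = ['•'] := by decide
lemma rep_dash : PySem.Chars.replace ['-'] ['-'] ['•'] = ['•'] := by decide
lemma rep_star : PySem.Chars.replace ['*'] ['*'] ['•'] = ['•'] := by decide
lemma rep_space : PySem.Chars.replace [' '] [' '] ['.', '\n'] = ['.', '\n'] := by decide

-- A's cascade and the fused cascade agree when the left cell holds a single raw character
lemma single_agree (a b x y : Char) :
    mutA [a] [b] [x] [y] = ruleR [a] b x y := by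
  rcases Decidable.em ([a] = ['\n'] ∧ b ∈ ['.', 'o', '-', '*'] ∧ x = ' ' ∧ PySem.Chars.isupper y = true) with h1 | h1
  · have hr : ruleR [a] b x y = ['•'] := by simp only [ruleR]; rw [if_pos h1]
    rw [hr]
    obtain ⟨ha, hb, hx, hy⟩ := h1
    have ha' : a = '\n' := by simpa using ha
    subst ha' hx
    have hy' : pyStrIsupper [y] = true := by rwa [pyStrIsupper_singleton]
    simp only [List.mem_cons, List.not_mem_nil, or_false] at hb
    rcases hb with rfl | rfl | rfl | rfl
    · simp [mutA, hy', rep_dot]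
    · simp [mutA, hy', rep_o]
    · simp [mutA, hy', rep_dash]
    · simp [mutA, hy', rep_star]
  · rcases Decidable.em (pyStrIslower [a] = true ∧ b = ' ' ∧ x = '\n' ∧ y = '\n') with h2 | h2
    · have hr : ruleR [a] b x y = ['.', '\n'] := by
        simp only [ruleR]; rw [if_neg h1, if_pos h2]
      rw [hr]
      obtain ⟨ha, rfl, rfl, rfl⟩ := h2
      simp [mutA, ha, rep_space]
    · rcases Decidable.em (pyStrIslower [a] = true ∧ b = '.' ∧ PySem.Chars.isupper x = true ∧ PySem.Chars.islower y = true) with h3 | h3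
      · have hr : ruleR [a] b x y = ['.', ' '] := by
          simp only [ruleR]; rw [if_neg h1, if_neg h2, if_pos h3]
        rw [hr]
        obtain ⟨ha, rfl, hx, hy⟩ := h3
        have hna : ¬([a] = (['\n'] : List Char)) := by
          have := islower_ne a (by rwa [pyStrIslower_singleton] at ha)
          simpa using this
        have hx' : pyStrIsupper [x] = true := by rwa [pyStrIsupper_singleton]
        have hy' : pyStrIslower [y] = true := by rwa [pyStrIslower_singleton]
        simp [mutA, ha, hx', hy', hna]
      · have hr : ruleR [a] b x y = [b] := by
          simp only [ruleR]; rw [if_neg h1, if_neg h2, if_neg h3]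
        rw [hr]
        have n1 : ¬(([a] : List Char) = ['\n'] ∧ ([b] : List Char) = ['.'] ∧
            ([x] : List Char) = [' '] ∧ pyStrIsupper [y] = true) := by
          rintro ⟨ha, hb, hx, hy⟩
          simp only [List.cons.injEq, and_true] at hb hx
          exact h1 ⟨ha, by simp [hb], hx, by rwa [pyStrIsupper_singleton] at hy⟩
        have n2 : ¬(([a] : List Char) = ['\n'] ∧ ([b] : List Char) = ['o'] ∧
            ([x] : List Char) = [' '] ∧ pyStrIsupper [y] = true) := by
          rintro ⟨ha, hb, hx, hy⟩
          simp only [List.cons.injEq, and_true] at hb hx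
          exact h1 ⟨ha, by simp [hb], hx, by rwa [pyStrIsupper_singleton] at hy⟩
        have n3 : ¬(([a] : List Char) = ['\n'] ∧ ([b] : List Char) = ['-'] ∧
            ([x] : List Char) = [' '] ∧ pyStrIsupper [y] = true) := by
          rintro ⟨ha, hb, hx, hy⟩
          simp only [List.cons.injEq, and_true] at hb hx
          exact h1 ⟨ha, by simp [hb], hx, by rwa [pyStrIsupper_singleton] at hy⟩
        have n4 : ¬(([a] : List Char) = ['\n'] ∧ ([b] : List Char) = ['*'] ∧
            ([x] : List Char) = [' '] ∧ pyStrIsupper [y] = true) := by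
          rintro ⟨ha, hb, hx, hy⟩
          simp only [List.cons.injEq, and_true] at hb hx
          exact h1 ⟨ha, by simp [hb], hx, by rwa [pyStrIsupper_singleton] at hy⟩
        have n5 : ¬(pyStrIslower [a] = true ∧ ([b] : List Char) = [' '] ∧
            ([x] : List Char) = ['\n'] ∧ ([y] : List Char) = ['\n']) := by
          rintro ⟨ha, hb, hx, hy⟩
          simp only [List.cons.injEq, and_true] at hb hx hy
          exact h2 ⟨ha, hb, hx, hy⟩
        have n6 : ¬(pyStrIslower [a] = true ∧ ([b] : List Char) = ['.'] ∧
            pyStrIsupper [x] = true ∧ pyStrIslower [y] = true) := by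
          rintro ⟨ha, hb, hx, hy⟩
          simp only [List.cons.injEq, and_true] at hb
          exact h3 ⟨ha, hb, by rwa [pyStrIsupper_singleton] at hx, by rwa [pyStrIslower_singleton] at hy⟩
        simp only [mutA]
        rw [if_neg n1, if_neg n2, if_neg n3, if_neg n4, if_neg n5, if_neg n6]

-- no-fire lemmas for the three replacement values and for the empty cell
lemma mutA_dead (l : List Char) (hl1 : l ≠ ['\n']) (hl2 : pyStrIslower l = false)
    (b x y : Char) : mutA l [b] [x] [y] = [b] := by
  simp only [mutA]
  split_ifs with h1 h2 h3 h4 h5 h6 <;>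
    first
    | rfl
    | (exfalso; first
        | exact hl1 h1.1 | exact hl1 h2.1 | exact hl1 h3.1 | exact hl1 h4.1
        | (rw [hl2] at h5; exact Bool.false_ne_true h5.1)
        | (rw [hl2] at h6; exact Bool.false_ne_true h6.1))

lemma ruleR_nil (b x y : Char) : ruleR [] b x y = [b] := by
  simp only [ruleR, pyStrIslower]
  split_ifs with h1 h2 h3 <;> first | rfl | simp_all

-- THE KEY LEMMA: A tests Casilla4, which holds the already-processed previous character;
-- the fused rule tests the raw previous character. The branch taken is the same.
lemma no_interference (l0 : List Char) (a b x y : Char) :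
    mutA (ruleR l0 a b x) [b] [x] [y] = ruleR [a] b x y := by
  rcases Decidable.em (l0 = ['\n'] ∧ a ∈ ['.', 'o', '-', '*'] ∧ b = ' ' ∧ PySem.Chars.isupper x = true) with h1 | h1
  · -- bullet rule fired at the previous position; left value is ['•']
    have hv : ruleR l0 a b x = ['•'] := by simp only [ruleR, if_pos h1]
    rw [hv]
    obtain ⟨hl, ha, hb, hx⟩ := h1
    subst hb
    rw [mutA_dead ['•'] (by decide) (by decide)]
    simp only [ruleR]
    split_ifs with g1 g2 g3
    · exact absurd g1.2.1 (by decide)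
    · exact absurd g2.2.2.1 ((isupper_ne x hx).1)
    · exact absurd g3.2.1 (by decide)
    · rfl
  · rcases Decidable.em (pyStrIslower l0 = true ∧ a = ' ' ∧ b = '\n' ∧ x = '\n') with h2 | h2
    · -- sentence-break rule fired; left value is ['.','\n']
      have hv : ruleR l0 a b x = ['.', '\n'] := by
        simp only [ruleR]; rw [if_neg h1, if_pos h2]
      rw [hv]
      obtain ⟨hl, ha, hb, hx⟩ := h2
      subst hb
      rw [mutA_dead ['.', '\n'] (by decide) (by decide)]
      simp only [ruleR]
      split_ifs with g1 g2 g3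
      · exact absurd g1.2.1 (by decide)
      · exact absurd g2.2.1 (by decide)
      · exact absurd g3.2.1 (by decide)
      · rfl
    · rcases Decidable.em (pyStrIslower l0 = true ∧ a = '.' ∧ PySem.Chars.isupper b = true ∧ PySem.Chars.islower x = true) with h3 | h3
      · -- period-space rule fired; left value is ['.',' ']; b is an uppercase letter
        have hv : ruleR l0 a b x = ['.', ' '] := by
          simp only [ruleR]; rw [if_neg h1, if_neg h2, if_pos h3]
        rw [hv]
        obtain ⟨hl, ha, hb, hx⟩ := h3
        rw [mutA_dead ['.', ' '] (by decide) (by decide)]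
        simp only [ruleR]
        have hne := isupper_ne b hb
        split_ifs with g1 g2 g3
        · have hb' := g1.2.1
          simp only [List.mem_cons, List.not_mem_nil, or_false] at hb'
          rcases hb' with h | h | h | h
          · exact absurd h hne.2.1
          · exact absurd h hne.2.2.1
          · exact absurd h hne.2.2.2.1
          · exact absurd h hne.2.2.2.2.1
        · exact absurd g2.2.1 hne.2.2.2.2.2
        · exact absurd g3.2.1 hne.2.1
        · rfl
      · -- no rule fired: the left value is the raw character
        have hv : ruleR l0 a b x = [a] := by
          simp only [ruleR]; rw [if_neg h1, if_neg h2, if_neg h3]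
        rw [hv]
        exact single_agree a b x y

-- the register state after consuming k characters of the padded text
def stA (P : List Char) (k : Nat) : List Char × List Char × List Char × List Char × List Char :=
  (P.take k).foldl stepA ([], [], [], [], [])

def cell1 (P : List Char) (k : Nat) : List Char := if k < 1 then [] else [P.getD (k - 1) 'X']
def cell2 (P : List Char) (k : Nat) : List Char := if k < 2 then [] else [P.getD (k - 2) 'X']
def cell3 (P : List Char) (k : Nat) : List Char := if k < 3 then [] else procB P (k - 3)
def cell4 (P : List Char) (k : Nat) : List Char := if k < 4 then [] else procB P (k - 4)
def outv (P : List Char) (k : Nat) : List Char := ((List.range (k - 4)).map (procB P)).flatten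

lemma stA_succ (P : List Char) (k : Nat) (hk : k < P.length) :
    stA P (k + 1) = stepA (stA P k) P[k] := by
  unfold stA
  rw [List.take_succ_eq_append_getElem hk, List.foldl_append]
  rfl

-- the loop invariant
lemma invariant (P : List Char) (k : Nat) (hk : k ≤ P.length) :
    stA P k = (cell4 P k, cell3 P k, cell2 P k, cell1 P k, outv P k) := by
  induction k with
  | zero => simp [stA, cell1, cell2, cell3, cell4, outv]
  | succ k ih =>
    have hklt : k < P.length := hk
    rw [stA_succ P k hklt, ih (le_of_lt hklt), stepA_eq]
    have hget : ∀ (m : Nat) (hm : m < P.length), P.getD m 'X' = P[m]'hm :=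
      fun m hm => List.getD_eq_getElem P 'X' hm
    refine Prod.ext ?_ (Prod.ext ?_ (Prod.ext ?_ (Prod.ext ?_ ?_))) <;> simp only
    · -- new Casilla4 = old Casilla3
      unfold cell3 cell4
      rcases Nat.lt_or_ge (k + 1) 4 with h | h
      · simp [Nat.lt_of_succ_lt_succ h, h]
      · have e : k + 1 - 4 = k - 3 := by omega
        rw [if_neg (by omega : ¬ k < 3), if_neg (by omega : ¬ k + 1 < 4), e]
    · -- new Casilla3: the mutated old Casilla2
      rcases Nat.lt_or_ge k 2 with h | h
      · interval_cases k
        · simp [cell1, cell2, cell3, mutA, pyStrIsupper, pyStrIslower]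
        · simp [cell1, cell2, cell3, mutA, pyStrIsupper, pyStrIslower]
      · rcases Nat.eq_or_lt_of_le h with h2 | h2
        · -- k = 2 : old Casilla3 is empty, position 0 is processed with empty left context
          subst h2
          simp only [cell1, cell2, cell3]
          norm_num
          rw [procB_eq]
          norm_num
          rw [ruleR_nil, mutA_dead [] (by decide) (by decide)]
        · -- k ≥ 3 : the key no-interference step
          have h3 : ¬ k < 3 := by omega
          simp only [cell1, cell2, cell3, if_neg h3, if_neg (by omega : ¬ k + 1 < 3),
            if_neg (by omega : ¬ k < 2), if_neg (by omega : ¬ k < 1)]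
          rw [← hget k hklt]
          rw [procB_eq P (k - 3), procB_eq P (k + 1 - 3)]
          have e1 : k + 1 - 3 = k - 2 := by omega
          have e2 : k - 3 + 1 = k - 2 := by omega
          have e3 : k - 3 + 2 = k - 1 := by omega
          have e4 : k - 2 + 1 = k - 1 := by omega
          have e5 : k - 2 + 2 = k := by omega
          have e6 : k - 2 - 1 = k - 3 := by omega
          rw [e1, e2, e3, e4, e5, e6, if_neg (by omega : ¬ k - 2 = 0)]
          exact no_interference (if k - 3 = 0 then [] else [P.getD (k - 3 - 1) 'X'])
            (P.getD (k - 3) 'X') (P.getD (k - 2) 'X') (P.getD (k - 1) 'X') (P.getD k 'X')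
    · -- new Casilla2 = old Casilla1
      unfold cell1 cell2
      rcases Nat.lt_or_ge k 1 with h | h
      · have : k = 0 := by omega
        subst this; simp
      · have e : k + 1 - 2 = k - 1 := by omega
        rw [if_neg (by omega : ¬ k < 1), if_neg (by omega : ¬ k + 1 < 2), e]
    · -- new Casilla1 = the character just read
      unfold cell1
      rw [if_neg (by omega : ¬ k + 1 < 1), Nat.add_sub_cancel, hget k hklt]
    · -- output: the old Casilla4 is appended
      unfold outv cell4
      rcases Nat.lt_or_ge k 4 with h | h
      · simp only [if_pos h]
        have : k + 1 - 4 = k - 4 := by omega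
        simp [this, (by omega : k - 4 = 0)]
      · simp only [if_neg (by omega : ¬ k < 4)]
        have : k + 1 - 4 = (k - 4) + 1 := by omega
        rw [this, List.range_succ]
        simp

-- port A computes exactly the fused pieces of the first |s| positions
lemma A_eq_flatten (s : String) :
    cambiandoBullets s =
      String.ofList (((List.range s.toList.length).map (procB (s.toList ++ "XXXX".toList))).flatten) := by
  unfold cambiandoBullets
  show String.ofList ((s.toList ++ "XXXX".toList).foldl stepA ([], [], [], [], [])).2.2.2.2 = _
  have hinv := invariant (s.toList ++ "XXXX".toList) (s.toList ++ "XXXX".toList).length (le_refl _)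
  simp only [stA, List.take_length] at hinv
  rw [hinv]
  simp only [outv]
  have e : (s.toList ++ "XXXX".toList).length - 4 = s.toList.length := by simp
  rw [e]


-- ---------- padding pieces ----------

lemma ruleR_plain (left : List Char) (c r1 r2 : Char)
    (h : c ≠ '.' ∧ c ≠ 'o' ∧ c ≠ '-' ∧ c ≠ '*' ∧ c ≠ ' ') : ruleR left c r1 r2 = [c] := by
  simp only [ruleR]
  split_ifs with g1 g2 g3
  · exfalso
    have hm := g1.2.1
    simp only [List.mem_cons, List.not_mem_nil, or_false] at hm
    rcases hm with rfl | rfl | rfl | rfl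
    · exact h.1 rfl
    · exact h.2.1 rfl
    · exact h.2.2.1 rfl
    · exact h.2.2.2.1 rfl
  · exact absurd g2.2.1 h.2.2.2.2
  · exact absurd g3.2.1 h.1
  · rfl

lemma getD_pad (s : List Char) (j : Nat) (hj : s.length ≤ j) :
    (s ++ ['X', 'X', 'X', 'X']).getD j 'X' = 'X' := by
  by_cases h : j < s.length + 4
  · have hlen : j < (s ++ ['X', 'X', 'X', 'X']).length := by simp; omega
    rw [List.getD_eq_getElem _ _ hlen, List.getElem_append_right hj]
    have h4 : j - s.length < 4 := by omega
    have hval : ∀ (k : Nat) (hk : k < 4), (['X', 'X', 'X', 'X'] : List Char)[k] = 'X' := by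
      intro k hk
      interval_cases k <;> rfl
    exact hval _ h4
  · apply List.getD_eq_default
    simp; omega

lemma procB_pad (s : List Char) (j : Nat) (hj : s.length ≤ j) :
    procB (s ++ ['X', 'X', 'X', 'X']) j = ['X'] := by
  rw [procB_eq, getD_pad s j hj]
  exact ruleR_plain _ _ _ _ (by refine ⟨?_, ?_, ?_, ?_, ?_⟩ <;> decide)

lemma F_full (s : List Char) :
    ((List.range (s.length + 4)).map (procB (s ++ ['X', 'X', 'X', 'X']))).flatten
      = ((List.range s.length).map (procB (s ++ ['X', 'X', 'X', 'X']))).flatten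
        ++ ['X', 'X', 'X', 'X'] := by
  have h4 : List.range (s.length + 4)
      = List.range s.length ++ [s.length, s.length + 1, s.length + 2, s.length + 3] := by
    rw [List.range_add]
    rfl
  rw [h4, List.map_append, List.flatten_append]
  congr 1
  simp only [List.map_cons, List.map_nil, List.flatten_cons, List.flatten_nil, List.append_nil]
  rw [procB_pad s s.length le_rfl, procB_pad s (s.length + 1) (by omega),
      procB_pad s (s.length + 2) (by omega), procB_pad s (s.length + 3) (by omega)]
  rfl

-- ---------- the window scan and its positional form ----------

def winSeg (E : List Char) : List Char → List Char → List Char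
  | _, [] => []
  | left, c :: rest =>
      ruleR left c ((rest ++ E).getD 0 'X') ((rest ++ E).getD 1 'X') ++ winSeg E [c] rest

def fpp (left0 L E : List Char) (j : Nat) : List Char :=
  ruleR (if j = 0 then left0 else [L.getD (j - 1) 'X']) (L.getD j 'X')
    ((L ++ E).getD (j + 1) 'X') ((L ++ E).getD (j + 2) 'X')

lemma fpp_shift (c : Char) (rest left0 E : List Char) (j : Nat) :
    fpp left0 (c :: rest) E (j + 1) = fpp [c] rest E j := by
  unfold fpp
  by_cases hj : j = 0
  · subst hj; rfl
  · obtain ⟨j', rfl⟩ := Nat.exists_eq_succ_of_ne_zero hj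
    rfl

lemma winSeg_eq_flatten : ∀ (L left0 E : List Char),
    winSeg E left0 L = ((List.range L.length).map (fpp left0 L E)).flatten := by
  intro L
  induction L with
  | nil => intro left0 E; simp [winSeg]
  | cons c rest ih =>
    intro left0 E
    simp only [winSeg, List.length_cons, List.range_succ_eq_map, List.map_cons,
      List.flatten_cons, List.map_map]
    have hm : List.map (fpp left0 (c :: rest) E ∘ Nat.succ) (List.range rest.length)
        = List.map (fpp [c] rest E) (List.range rest.length) :=
      List.map_congr_left (fun j _ => fpp_shift c rest left0 E j)
    rw [hm, ← ih [c] E]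
    rfl

lemma procB_fpp (P : List Char) (j : Nat) : procB P j = fpp [] P [] j := by
  rw [procB_eq]
  unfold fpp
  rw [List.append_nil]

def lastLeft (left : List Char) (L : List Char) : List Char :=
  match L.getLast? with
  | none => left
  | some c => [c]

lemma lastLeft_cons (left : List Char) (c : Char) (rest : List Char) :
    lastLeft left (c :: rest) = lastLeft [c] rest := by
  cases rest with
  | nil => rfl
  | cons d rest' =>
    rcases hx : (d :: rest').getLast? with _ | x
    · simp at hx
    · simp [lastLeft, hx]

lemma winSeg_split : ∀ (L M left : List Char),
    winSeg [] left (L ++ M) = winSeg M left L ++ winSeg [] (lastLeft left L) M := by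
  intro L
  induction L with
  | nil => intro M left; simp [winSeg, lastLeft]
  | cons c rest ih =>
    intro M left
    simp only [List.cons_append, winSeg, List.append_assoc, List.append_nil]
    rw [ih M [c], lastLeft_cons]

-- ---------- Python split('\n') as a clean recursion ----------

def mySplit (pre : List Char) : List Char → List (List Char)
  | [] => [pre]
  | c :: r => if c = '\n' then pre :: mySplit [] r else mySplit (pre ++ [c]) r

lemma splitOn_go_eq : ∀ (fuel : Nat) (l cur : List Char) (acc : List (List Char)),
    l.length < fuel →
    PySem.Chars.splitOn.go ['\n'] fuel l cur acc = acc.reverse ++ mySplit cur.reverse l := by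
  intro fuel
  induction fuel with
  | zero => intro l cur acc h; omega
  | succ fuel ih =>
    intro l cur acc h
    cases l with
    | nil =>
      rw [PySem.Chars.splitOn.go]
      · simp [mySplit]
      · omega
    | cons c rest =>
      rw [PySem.Chars.splitOn.go]
      by_cases hc : c = '\n'
      · subst hc
        rw [if_pos (by simp [List.isPrefixOf])]
        simp only [List.length_cons, List.length_nil, List.drop_succ_cons, List.drop_zero]
        rw [ih rest [] (cur.reverse :: acc) (Nat.lt_of_succ_lt_succ (by simpa using h))]
        conv_rhs => rw [mySplit]
        rw [if_pos rfl]
        simp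
      · rw [if_neg (by simp [List.isPrefixOf]; exact Ne.symm hc)]
        rw [ih rest (c :: cur) acc (Nat.lt_of_succ_lt_succ (by simpa using h))]
        conv_rhs => rw [mySplit]
        rw [if_neg hc, List.reverse_cons]

lemma splitOn_eq (t : List Char) : PySem.Chars.splitOn t ['\n'] = mySplit [] t := by
  show PySem.Chars.splitOn.go ['\n'] (t.length + 1) t [] [] = mySplit [] t
  rw [splitOn_go_eq (t.length + 1) t [] [] (by omega)]
  rfl

lemma mySplit_ne_nil : ∀ (r pre : List Char), mySplit pre r ≠ [] := by
  intro r
  induction r with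
  | nil => intro pre; simp [mySplit]
  | cons c r' ih =>
    intro pre
    simp only [mySplit]
    split_ifs
    · simp
    · exact ih _

lemma mySplit_no_newline : ∀ (r pre : List Char), '\n' ∉ r → mySplit pre r = [pre ++ r] := by
  intro r
  induction r with
  | nil => intro pre _; simp [mySplit]
  | cons c r' ih =>
    intro pre h
    simp only [List.mem_cons, not_or] at h
    rw [mySplit, if_neg (fun hh => h.1 hh.symm), ih _ h.2, List.append_assoc]
    rfl

lemma mySplit_append_newline : ∀ (L R pre : List Char), '\n' ∉ L →
    mySplit pre (L ++ '\n' :: R) = (pre ++ L) :: mySplit [] R := by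
  intro L
  induction L with
  | nil => intro R pre _; simp [mySplit]
  | cons c L' ih =>
    intro R pre h
    simp only [List.mem_cons, not_or] at h
    rw [List.cons_append, mySplit, if_neg (fun hh => h.1 hh.symm), ih _ _ h.2, List.append_assoc]
    rfl

lemma mySplit_head_shape : ∀ (r pre : List Char), ∃ u rest, mySplit pre r = (pre ++ u) :: rest := by
  intro r
  induction r with
  | nil => intro pre; exact ⟨[], [], by simp [mySplit]⟩
  | cons c r' ih =>
    intro pre
    simp only [mySplit]
    split_ifs
    · exact ⟨[], mySplit [] r', by simp⟩
    · obtain ⟨u, rest, hu⟩ := ih (pre ++ [c])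
      exact ⟨c :: u, rest, by rw [hu, List.append_assoc]; rfl⟩


-- ---------- small character/slice helpers ----------

lemma pyStrIslower_empty : pyStrIslower [] = false := rfl

lemma pyStrIsupper_empty : pyStrIsupper [] = false := rfl

lemma take_one_drop (xs : List Char) (k : Nat) (h : k < xs.length) :
    (xs.drop k).take 1 = [xs.getD k 'X'] := by
  rw [List.getD_eq_getElem _ _ h, List.drop_eq_getElem_cons h]
  rfl

lemma take_one_drop_ge (xs : List Char) (k : Nat) (h : xs.length ≤ k) :
    (xs.drop k).take 1 = [] := by
  rw [List.drop_eq_nil_of_le h]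
  rfl

lemma getD_mem (L : List Char) (k : Nat) (h : k < L.length) : L.getD k 'X' ∈ L := by
  rw [List.getD_eq_getElem _ _ h]
  exact List.getElem_mem h

lemma getD_append_lt (L E : List Char) (k : Nat) (h : k < L.length) :
    (L ++ E).getD k 'X' = L.getD k 'X' := by
  rw [List.getD_eq_getElem _ _ (by simp; omega), List.getD_eq_getElem _ _ h,
    List.getElem_append_left h]

lemma getD_append_ge (L E : List Char) (k : Nat) (h : L.length ≤ k) :
    (L ++ E).getD k 'X' = E.getD (k - L.length) 'X' := by
  by_cases h2 : k < L.length + E.length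
  · rw [List.getD_eq_getElem _ _ (by simp; omega), List.getD_eq_getElem _ _ (by omega),
      List.getElem_append_right h]
  · rw [List.getD_eq_default _ _ (by simp; omega), List.getD_eq_default _ _ (by omega)]

-- ---------- stage functions in positional normal form ----------

lemma bulletFix_eq (i : Int) (L : List Char) :
    bulletFix i L =
      if 0 < i ∧ L.take 2 ∈ [['.',' '], ['o',' '], ['-',' '], ['*',' ']]
          ∧ pyStrIsupper ((L.drop 2).take 1) = true
      then '•' :: L.drop 1 else L := by
  unfold bulletFix
  rw [PySem.List.slice_to L (by omega : (0:Int) ≤ 2),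
      PySem.List.slice_toNat L (by omega : (0:Int) ≤ 2) (by omega : (0:Int) ≤ 3),
      PySem.List.slice_from L (by omega : (0:Int) ≤ 1)]
  rfl

lemma spacePiece_nat (L : List Char) (j : Nat) (ch : Char) :
    spacePiece L (j : Int) ch =
      if 0 < j ∧ pyStrIslower ((L.drop (j - 1)).take 1) = true ∧ ch = '.'
         ∧ pyStrIsupper ((L.drop (j + 1)).take 1) = true
         ∧ pyStrIslower ((L.drop (j + 2)).take 1) = true
      then ['.', ' '] else [ch] := by
  unfold spacePiece
  rcases Nat.eq_zero_or_pos j with hj | hj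
  · subst hj
    norm_num
  · obtain ⟨j', rfl⟩ := Nat.exists_eq_succ_of_ne_zero (by omega : j ≠ 0)
    have s1 : PySem.List.slice L (some ((((j' + 1 : Nat)) : Int) - 1)) (some (((j' + 1 : Nat)) : Int))
        = (L.drop j').take 1 := by
      have e1 : (((j' + 1 : Nat)) : Int) - 1 = ((j' : Nat) : Int) := by push_cast; ring
      have e2 : (((j' + 1 : Nat)) : Int) = ((j' : Nat) : Int) + ((1 : Nat) : Int) := by push_cast; ring
      rw [e1, e2, PySem.List.slice_natCast_add]
    have s2 : PySem.List.slice L (some ((((j' + 1 : Nat)) : Int) + 1)) (some ((((j' + 1 : Nat)) : Int) + 2))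
        = (L.drop (j' + 2)).take 1 := by
      have e1 : (((j' + 1 : Nat)) : Int) + 1 = (((j' + 2 : Nat)) : Int) := by push_cast; ring
      have e2 : (((j' + 1 : Nat)) : Int) + 2 = (((j' + 2 : Nat)) : Int) + ((1 : Nat) : Int) := by push_cast; ring
      rw [e1, e2, PySem.List.slice_natCast_add]
    have s3 : PySem.List.slice L (some ((((j' + 1 : Nat)) : Int) + 2)) (some ((((j' + 1 : Nat)) : Int) + 3))
        = (L.drop (j' + 3)).take 1 := by
      have e1 : (((j' + 1 : Nat)) : Int) + 2 = (((j' + 3 : Nat)) : Int) := by push_cast; ring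
      have e2 : (((j' + 1 : Nat)) : Int) + 3 = (((j' + 3 : Nat)) : Int) + ((1 : Nat) : Int) := by push_cast; ring
      rw [e1, e2, PySem.List.slice_natCast_add]
    rw [s1, s2, s3]
    have e3 : j' + 1 - 1 = j' := by omega
    have e4 : (0 : Int) < ((j' + 1 : Nat) : Int) := by positivity
    rw [e3]
    simp only [Int.natCast_pos]

lemma enumerate_cons {α : Type} (c : α) (cs : List α) (k : Int) :
    PySem.List.enumerate (c :: cs) k = (k, c) :: PySem.List.enumerate cs (k + 1) := by
  rw [PySem.List.enumerate]

lemma enum_map_flatten (g : Int → Char → List Char) : ∀ (cs : List Char) (k : Nat),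
    ((PySem.List.enumerate cs (k : Int)).map (fun p => g p.1 p.2)).flatten
      = ((List.range cs.length).map (fun j => g (((k + j : Nat)) : Int) (cs.getD j 'X'))).flatten := by
  intro cs
  induction cs with
  | nil => intro k; rw [PySem.List.enumerate]; rfl
  | cons c cs ih =>
    intro k
    rw [enumerate_cons]
    simp only [List.map_cons, List.flatten_cons, List.length_cons, List.range_succ_eq_map,
      List.map_map]
    have h1 : ((k : Int) + 1) = (((k + 1 : Nat)) : Int) := by push_cast; ring
    rw [h1, ih (k + 1)]
    refine congrArg₂ (fun a b => a ++ b) ?_ ?_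
    · show g (k : Int) c = g (((k + 0 : Nat)) : Int) ((c :: cs).getD 0 'X')
      norm_num
    · refine congrArg List.flatten (List.map_congr_left ?_)
      intro j _
      show g ((((k + 1) + j : Nat)) : Int) (cs.getD j 'X')
          = g (((k + (j + 1) : Nat)) : Int) ((c :: cs).getD (j + 1) 'X')
      rw [List.getD_cons_succ]
      congr 2
      omega

lemma spaceFix_eq (L' : List Char) :
    spaceFix L' = ((List.range L'.length).map
      (fun j : Nat => spacePiece L' (j : Int) (L'.getD j 'X'))).flatten := by
  unfold spaceFix
  have := enum_map_flatten (fun i ch => spacePiece L' i ch) L' 0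
  simpa using this


-- ---------- per-line agreement between B's staged fixes and the fused rule ----------

lemma pyStrIslower_nl : pyStrIslower ['\n'] = false := by decide

lemma ruleR_noBullet_noLower (left : List Char) (c r1 r2 : Char)
    (hb : ¬(left = ['\n'] ∧ c ∈ ['.', 'o', '-', '*'] ∧ r1 = ' ' ∧ PySem.Chars.isupper r2 = true))
    (hl : pyStrIslower left = false) :
    ruleR left c r1 r2 = [c] := by
  simp only [ruleR]
  split_ifs with g1 g2
  · rw [hl] at g1; exact absurd g1.1 (by simp)
  · rw [hl] at g2; exact absurd g2.1 (by simp)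
  · rfl

lemma rule3_form (lft c r1 r2 : Char)
    (hlft : lft ≠ '\n') (hr1 : r1 ≠ '\n') :
    ruleR [lft] c r1 r2 =
      if PySem.Chars.islower lft = true ∧ c = '.' ∧ PySem.Chars.isupper r1 = true
          ∧ PySem.Chars.islower r2 = true
      then ['.', ' '] else [c] := by
  have hb : ¬([lft] = ['\n'] ∧ c ∈ ['.', 'o', '-', '*'] ∧ r1 = ' ' ∧ PySem.Chars.isupper r2 = true) :=
    fun g => hlft (by simpa using g.1)
  have hbr : ¬(PySem.Chars.islower lft = true ∧ c = ' ' ∧ r1 = '\n' ∧ r2 = '\n') :=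
    fun g => hr1 g.2.2.1
  simp only [ruleR, if_neg hb, if_neg hbr, pyStrIslower_singleton]

lemma ruleBreak_form (lft c r1 r2 : Char)
    (hlft : lft ≠ '\n') (hnr : ¬(PySem.Chars.isupper r1 = true ∧ PySem.Chars.islower r2 = true)) :
    ruleR [lft] c r1 r2 =
      if PySem.Chars.islower lft = true ∧ c = ' ' ∧ r1 = '\n' ∧ r2 = '\n'
      then ['.', '\n'] else [c] := by
  have hb : ¬([lft] = ['\n'] ∧ c ∈ ['.', 'o', '-', '*'] ∧ r1 = ' ' ∧ PySem.Chars.isupper r2 = true) :=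
    fun g => hlft (by simpa using g.1)
  have h3 : ¬(PySem.Chars.islower lft = true ∧ c = '.' ∧ PySem.Chars.isupper r1 = true ∧ PySem.Chars.islower r2 = true) :=
    fun g => hnr ⟨g.2.2.1, g.2.2.2⟩
  simp only [ruleR, if_neg hb, if_neg h3, pyStrIslower_singleton]

lemma pairs_len (t : List Char) (h : t ∈ [['.',' '], ['o',' '], ['-',' '], ['*',' ']]) :
    t.length = 2 := by
  simp only [List.mem_cons, List.not_mem_nil, or_false] at h
  rcases h with rfl | rfl | rfl | rfl <;> rfl

lemma take2_eq (L : List Char) (h : 2 ≤ L.length) :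
    L.take 2 = [L.getD 0 'X', L.getD 1 'X'] := by
  rcases L with _ | ⟨a, _ | ⟨b, rest⟩⟩
  · simp at h
  · simp at h
  · rfl

lemma pairs_iff (a b : Char) :
    ([a, b] ∈ [['.',' '], ['o',' '], ['-',' '], ['*',' ']])
      ↔ (a ∈ ['.', 'o', '-', '*'] ∧ b = ' ') := by
  simp only [List.mem_cons, List.not_mem_nil, or_false, List.cons.injEq, and_true]
  tauto

lemma bulletFix_id_of_short (i : Int) (L : List Char) (h : L.length < 2) :
    bulletFix i L = L := by
  rw [bulletFix_eq]
  refine if_neg (fun g => ?_)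
  have h2 := pairs_len _ g.2.1
  simp [List.length_take] at h2
  omega

lemma bulletFix_len (i : Int) (L : List Char) : (bulletFix i L).length = L.length := by
  rw [bulletFix_eq]
  split_ifs with g
  · have h2 := pairs_len _ g.2.1
    simp only [List.length_take] at h2
    simp only [List.length_cons, List.length_drop]
    omega
  · rfl

lemma bulletFix_getD_succ (i : Int) (L : List Char) (k : Nat) (hk : 1 ≤ k) :
    (bulletFix i L).getD k 'X' = L.getD k 'X' := by
  rw [bulletFix_eq]
  split_ifs with g
  · obtain ⟨k', rfl⟩ := Nat.exists_eq_succ_of_ne_zero (by omega : k ≠ 0)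
    rw [List.getD_cons_succ]
    simp only [List.getD, List.getElem?_drop]
    rw [Nat.add_comm 1 k']
  · rfl

lemma bulletFix_getD0 (i : Int) (L : List Char) :
    (bulletFix i L).getD 0 'X' = L.getD 0 'X'
      ∨ (L.getD 1 'X' = ' ' ∧ (bulletFix i L).getD 0 'X' = '•') := by
  rw [bulletFix_eq]
  split_ifs with g
  · right
    have hlen : 2 ≤ L.length := by
      have h2 := pairs_len _ g.2.1
      simp only [List.length_take] at h2
      omega
    have := g.2.1
    rw [take2_eq L hlen] at this
    rw [pairs_iff] at this
    exact ⟨this.2, rfl⟩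
  · left; rfl

lemma bullet_iff (L E : List Char) (left0 : List Char) (i : Int)
    (hE : (∃ R, E = '\n' :: R) ∨ (E = [] ∧ 3 ≤ L.length))
    (hi : (0 < i) ↔ left0 = ['\n']) :
    (0 < i ∧ L.take 2 ∈ [['.',' '], ['o',' '], ['-',' '], ['*',' ']]
       ∧ pyStrIsupper ((L.drop 2).take 1) = true)
    ↔ (left0 = ['\n'] ∧ L.getD 0 'X' ∈ ['.', 'o', '-', '*'] ∧ (L ++ E).getD 1 'X' = ' '
       ∧ PySem.Chars.isupper ((L ++ E).getD 2 'X') = true) := by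
  rcases Nat.lt_or_ge L.length 2 with hn | hn
  · -- |L| ≤ 1 : both sides false
    constructor
    · rintro ⟨-, hmem, -⟩
      exfalso
      have h2 := pairs_len _ hmem
      simp only [List.length_take] at h2
      omega
    · rintro ⟨-, hmem, hsp, -⟩
      exfalso
      rcases hE with ⟨R, rfl⟩ | ⟨rfl, h3⟩
      · rcases L with _ | ⟨a, L1⟩
        · simp at hmem
        · have h1 : L1 = [] := by
            cases L1
            · rfl
            · exfalso; simp only [List.length_cons] at hn; omega
          subst h1
          simp at hsp
      · omega
  · -- |L| ≥ 2
    have ht2 := take2_eq L hn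
    rw [ht2, pairs_iff, hi]
    have hg1 : (L ++ E).getD 1 'X' = L.getD 1 'X' := getD_append_lt L E 1 (by omega)
    rw [hg1]
    rcases Nat.lt_or_ge L.length 3 with hn3 | hn3
    · -- |L| = 2 : third conjuncts both false
      have hL2 : L.length = 2 := by omega
      have hdrop : (L.drop 2).take 1 = [] := take_one_drop_ge L 2 (by omega)
      rw [hdrop, pyStrIsupper_empty]
      have hE' : (L ++ E).getD 2 'X' = E.getD 0 'X' := by
        rw [getD_append_ge L E 2 (by omega), hL2]
      rcases hE with ⟨R, rfl⟩ | ⟨rfl, h3⟩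
      · rw [hE']
        simp only [List.getD_cons_zero]
        constructor
        · rintro ⟨-, -, h⟩; exact absurd h (by simp)
        · rintro ⟨-, -, -, h⟩; exact absurd h (by decide)
      · omega
    · -- |L| ≥ 3
      have hdrop : (L.drop 2).take 1 = [L.getD 2 'X'] := take_one_drop L 2 (by omega)
      rw [hdrop, pyStrIsupper_singleton, getD_append_lt L E 2 (by omega)]
      tauto

lemma fpp0_eq (L E : List Char) (left0 : List Char) (i : Int)
    (hE : (∃ R, E = '\n' :: R) ∨ (E = [] ∧ 3 ≤ L.length))
    (hl0 : left0 = [] ∨ left0 = ['\n'])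
    (hi : (0 < i) ↔ left0 = ['\n']) :
    [(bulletFix i L).getD 0 'X'] = fpp left0 L E 0 := by
  have hfp : fpp left0 L E 0
      = ruleR left0 (L.getD 0 'X') ((L ++ E).getD 1 'X') ((L ++ E).getD 2 'X') := by
    unfold fpp
    norm_num
  rw [bulletFix_eq, hfp]
  by_cases hbc : (0 < i ∧ L.take 2 ∈ [['.',' '], ['o',' '], ['-',' '], ['*',' ']]
       ∧ pyStrIsupper ((L.drop 2).take 1) = true)
  · rw [if_pos hbc]
    have hf := (bullet_iff L E left0 i hE hi).mp hbc
    simp only [ruleR]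
    rw [if_pos ⟨hf.1, hf.2.1, hf.2.2.1, hf.2.2.2⟩]
    rfl
  · rw [if_neg hbc]
    have hnf := (not_iff_not.mpr (bullet_iff L E left0 i hE hi)).mp hbc
    rw [ruleR_noBullet_noLower _ _ _ _ hnf
      (by rcases hl0 with rfl | rfl
          · exact pyStrIslower_empty
          · exact pyStrIslower_nl)]


lemma fpp_zero (left0 L E : List Char) :
    fpp left0 L E 0 = ruleR left0 (L.getD 0 'X') ((L ++ E).getD 1 'X') ((L ++ E).getD 2 'X') := by
  unfold fpp
  norm_num

lemma piece_mid (L E : List Char) (left0 L' : List Char) (j : Nat)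
    (hNL : '\n' ∉ L)
    (hE0 : PySem.Chars.islower (E.getD 0 'X') = false)
    (hlen : L'.length = L.length)
    (hget : ∀ k, 1 ≤ k → L'.getD k 'X' = L.getD k 'X')
    (hget0 : L'.getD 0 'X' = L.getD 0 'X' ∨ (L.getD 1 'X' = ' ' ∧ L'.getD 0 'X' = '•'))
    (hj1 : 1 ≤ j) (hj2 : j + 2 ≤ L.length) :
    spacePiece L' (j : Int) (L'.getD j 'X') = fpp left0 L E j := by
  have hnotnl : ∀ k, k < L.length → L.getD k 'X' ≠ '\n' :=
    fun k hk h => hNL (h ▸ getD_mem L k hk)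
  have hfpp : fpp left0 L E j
      = ruleR [L.getD (j - 1) 'X'] (L.getD j 'X') (L.getD (j + 1) 'X') ((L ++ E).getD (j + 2) 'X') := by
    unfold fpp
    rw [if_neg (by omega : ¬ j = 0), getD_append_lt L E (j + 1) (by omega)]
  have hch : L'.getD j 'X' = L.getD j 'X' := hget j hj1
  rw [spacePiece_nat, hfpp,
    rule3_form _ _ _ _ (hnotnl (j - 1) (by omega)) (hnotnl (j + 1) (by omega))]
  have e1 : (L'.drop (j - 1)).take 1 = [L'.getD (j - 1) 'X'] := take_one_drop L' (j - 1) (by omega)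
  have e2 : (L'.drop (j + 1)).take 1 = [L.getD (j + 1) 'X'] := by
    rw [take_one_drop L' (j + 1) (by omega), hget (j + 1) (by omega)]
  rw [e1, e2, hch, pyStrIslower_singleton, pyStrIsupper_singleton]
  have hleft : L'.getD (j - 1) 'X' = L.getD (j - 1) 'X' ∨ L.getD j 'X' ≠ '.' := by
    rcases Nat.eq_or_lt_of_le hj1 with hj' | hj'
    · rcases hget0 with h0 | ⟨hsp, h0⟩
      · left; rw [← hj']; exact h0
      · right; rw [← hj']; rw [hsp]; decide
    · left; exact hget (j - 1) (by omega)
  rcases Nat.lt_or_ge (j + 2) L.length with h2 | h2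
  · rw [take_one_drop L' (j + 2) (by omega), hget (j + 2) (by omega), pyStrIslower_singleton,
      getD_append_lt L E (j + 2) h2]
    rcases hleft with hL0 | hnd
    · rw [hL0]
      refine if_congr ?_ rfl rfl
      constructor
      · rintro ⟨-, a, b, d, e⟩; exact ⟨a, b, d, e⟩
      · rintro ⟨a, b, d, e⟩; exact ⟨hj1, a, b, d, e⟩
    · refine if_congr ?_ rfl rfl
      constructor
      · rintro ⟨-, -, b, -⟩; exact absurd b hnd
      · rintro ⟨-, b, -⟩; exact absurd b hnd
  · have e3 : (L'.drop (j + 2)).take 1 = [] := take_one_drop_ge L' (j + 2) (by omega)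
    rw [e3, getD_append_ge L E (j + 2) h2, (by omega : j + 2 - L.length = 0)]
    refine if_congr ?_ rfl rfl
    constructor
    · rintro ⟨-, -, -, -, hfls⟩
      rw [pyStrIslower_empty] at hfls
      exact absurd hfls (by simp)
    · rintro ⟨-, -, -, hfls⟩
      rw [hE0] at hfls
      exact absurd hfls (by simp)

lemma piece_last_B (L L' : List Char) (j : Nat)
    (hlen : L'.length = L.length)
    (hget : ∀ k, 1 ≤ k → L'.getD k 'X' = L.getD k 'X')
    (hj : j + 1 = L.length) (hj1 : 1 ≤ j) :
    spacePiece L' (j : Int) (L'.getD j 'X') = [L.getD j 'X'] := by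
  rw [spacePiece_nat, hget j hj1]
  refine if_neg ?_
  rintro ⟨-, -, -, hup, -⟩
  rw [take_one_drop_ge L' (j + 1) (by omega), pyStrIsupper_empty] at hup
  exact absurd hup (by simp)

lemma fppLast (L E : List Char) (left0 : List Char) (j : Nat)
    (hNL : '\n' ∉ L)
    (hE : (∃ R, E = '\n' :: R) ∨ E = [])
    (hj : j + 1 = L.length) (hj1 : 1 ≤ j) :
    fpp left0 L E j =
      if PySem.Chars.islower (L.getD (j - 1) 'X') = true ∧ L.getD j 'X' = ' '
          ∧ E.getD 0 'X' = '\n' ∧ E.getD 1 'X' = '\n'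
      then ['.', '\n'] else [L.getD j 'X'] := by
  have hfpp : fpp left0 L E j
      = ruleR [L.getD (j - 1) 'X'] (L.getD j 'X') (E.getD 0 'X') (E.getD 1 'X') := by
    unfold fpp
    rw [if_neg (by omega : ¬ j = 0), getD_append_ge L E (j + 1) (by omega),
      getD_append_ge L E (j + 2) (by omega), (by omega : j + 1 - L.length = 0),
      (by omega : j + 2 - L.length = 1)]
  rw [hfpp]
  apply ruleBreak_form
  · exact fun h => hNL (h ▸ getD_mem L (j - 1) (by omega))
  · rintro ⟨hu, hl⟩
    rcases hE with ⟨R, rfl⟩ | rfl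
    · rw [List.getD_cons_zero] at hu
      exact absurd hu (by decide)
    · rw [List.getD_nil] at hl
      exact absurd hl (by decide)

lemma fppPen (L E : List Char) (left0 : List Char) (j : Nat)
    (hNL : '\n' ∉ L)
    (hE : (∃ R, E = '\n' :: R) ∨ (E = [] ∧ 3 ≤ L.length))
    (hl0 : left0 = [] ∨ left0 = ['\n'])
    (hj : j + 2 = L.length) :
    fpp left0 L E j = [L.getD j 'X'] := by
  rcases Nat.eq_zero_or_pos j with rfl | hj1
  · rcases hE with ⟨R, rfl⟩ | ⟨rfl, h3⟩
    · have hfp : fpp left0 L ('\n' :: R) 0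
          = ruleR left0 (L.getD 0 'X') (L.getD 1 'X') '\n' := by
        rw [fpp_zero, getD_append_lt L _ 1 (by omega), getD_append_ge L _ 2 (by omega),
          (by omega : 2 - L.length = 0), List.getD_cons_zero]
      rw [hfp]
      apply ruleR_noBullet_noLower
      · rintro ⟨-, -, -, hup⟩; exact absurd hup (by decide)
      · rcases hl0 with rfl | rfl
        · exact pyStrIslower_empty
        · exact pyStrIslower_nl
    · omega
  · have hnotnl : ∀ k, k < L.length → L.getD k 'X' ≠ '\n' :=
      fun k hk h => hNL (h ▸ getD_mem L k hk)
    have hfpp : fpp left0 L E j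
        = ruleR [L.getD (j - 1) 'X'] (L.getD j 'X') (L.getD (j + 1) 'X') (E.getD 0 'X') := by
      unfold fpp
      rw [if_neg (by omega : ¬ j = 0), getD_append_lt L E (j + 1) (by omega),
        getD_append_ge L E (j + 2) (by omega), (by omega : j + 2 - L.length = 0)]
    rw [hfpp, rule3_form _ _ _ _ (hnotnl (j - 1) (by omega)) (hnotnl (j + 1) (by omega))]
    refine if_neg ?_
    rintro ⟨-, -, -, hlo⟩
    rcases hE with ⟨R, rfl⟩ | ⟨rfl, -⟩
    · rw [List.getD_cons_zero] at hlo
      exact absurd hlo (by decide)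
    · rw [List.getD_nil] at hlo
      exact absurd hlo (by decide)

lemma endswith_append_singleton (u : List Char) (a b : Char) :
    PySem.Chars.endswith (u ++ [a]) [b] = true ↔ a = b := by
  rw [PySem.Chars.endswith_iff]
  constructor
  · rintro ⟨t, ht⟩
    have h1 : (t ++ [b]).getLast? = some b := List.getLast?_concat
    rw [ht, List.getLast?_concat] at h1
    exact Option.some.inj h1
  · rintro rfl
    exact ⟨u, rfl⟩

lemma slice_n2_n1 (u : List Char) (a b : Char) :
    PySem.List.slice (u ++ [a, b]) (some (-2)) (some (-1)) = [a] := by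
  have hlen : (u ++ [a, b]).length = u.length + 2 := by simp
  simp only [PySem.List.slice, PySem.List.clampIdx_neg_one, hlen]
  rw [PySem.List.clampIdx_neg_ofNat _ 2 (by omega)]
  rw [(by omega : u.length + 2 - 2 = u.length)]
  have hdrop : (u ++ [a, b]).drop u.length = [a, b] := List.drop_left
  rw [hdrop, (by omega : u.length + 2 - 1 - u.length = 1)]
  rfl

lemma slice_n2_n1_short (u : List Char) (h : u.length < 2) :
    PySem.List.slice u (some (-2)) (some (-1)) = [] := by
  simp only [PySem.List.slice, PySem.List.clampIdx_neg_one]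
  rw [PySem.List.clampIdx_neg_ofNat _ 2 (by omega)]
  rw [(by omega : u.length - 2 = 0), List.drop_zero, (by omega : u.length - 1 - 0 = 0)]
  rfl

lemma line_eq (L E : List Char) (left0 : List Char) (i : Int) (lines : List (List Char))
    (hE : (∃ R, E = '\n' :: R) ∨ (E = [] ∧ 3 ≤ L.length))
    (hNL : '\n' ∉ L)
    (hl0 : left0 = [] ∨ left0 = ['\n'])
    (hi : (0 < i) ↔ left0 = ['\n'])
    (hguard : ((i + 1 < (lines.length : Int)) ∧ PySem.List.pyGet? lines (i + 1) = some ([] : List Char))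
        ↔ (E.getD 0 'X' = '\n' ∧ E.getD 1 'X' = '\n')) :
    breakFix lines i (spaceFix (bulletFix i L)) = winSeg E left0 L := by
  have hE' : (∃ R, E = '\n' :: R) ∨ E = [] := by
    rcases hE with h | h
    · exact Or.inl h
    · exact Or.inr h.1
  have hE0 : PySem.Chars.islower (E.getD 0 'X') = false := by
    rcases hE' with ⟨R, rfl⟩ | rfl
    · rw [List.getD_cons_zero]; decide
    · rw [List.getD_nil]; decide
  have hlen : (bulletFix i L).length = L.length := bulletFix_len i L
  have hget : ∀ k, 1 ≤ k → (bulletFix i L).getD k 'X' = L.getD k 'X' :=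
    fun k hk => bulletFix_getD_succ i L k hk
  have hget0 := bulletFix_getD0 i L
  rw [winSeg_eq_flatten]
  rcases Nat.eq_zero_or_pos L.length with hn0 | hn
  · -- empty line: nothing fires
    have hLnil : L = [] := List.eq_nil_of_length_eq_zero hn0
    subst hLnil
    rw [bulletFix_id_of_short i [] (by simp)]
    have hsp : spaceFix ([] : List Char) = [] := by rw [spaceFix_eq]; rfl
    rw [hsp]
    have hbk : breakFix lines i [] = [] := by
      unfold breakFix
      refine if_neg ?_
      rintro ⟨-, -, hend, -⟩
      exact absurd hend (by decide)
    rw [hbk]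
    rfl
  · -- non-empty line
    have hsp : spaceFix (bulletFix i L)
        = ((List.range (L.length - 1)).map (fpp left0 L E)).flatten
          ++ [L.getD (L.length - 1) 'X'] := by
      rw [spaceFix_eq, hlen]
      conv_lhs => rw [(by omega : L.length = (L.length - 1) + 1), List.range_succ]
      rw [List.map_append, List.flatten_append]
      congr 1
      · refine congrArg List.flatten (List.map_congr_left ?_)
        intro j hj
        rw [List.mem_range] at hj
        rcases Nat.eq_zero_or_pos j with rfl | hjpos
        · have hz : spacePiece (bulletFix i L) ((0 : Nat) : Int) ((bulletFix i L).getD 0 'X')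
              = [(bulletFix i L).getD 0 'X'] := by
            rw [spacePiece_nat]
            exact if_neg (by rintro ⟨h0, -⟩; omega)
          rw [hz]
          exact fpp0_eq L E left0 i hE hl0 hi
        · exact piece_mid L E left0 (bulletFix i L) j hNL hE0 hlen hget hget0 hjpos (by omega)
      · simp only [List.map_cons, List.map_nil, List.flatten_cons, List.flatten_nil,
          List.append_nil]
        rcases Nat.lt_or_ge L.length 2 with h1 | h1
        · have hbid : bulletFix i L = L := bulletFix_id_of_short i L (by omega)
          rw [hbid, (by omega : L.length - 1 = 0), spacePiece_nat]
          exact if_neg (by rintro ⟨h0, -⟩; omega)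
        · exact piece_last_B L (bulletFix i L) (L.length - 1) hlen hget (by omega) (by omega)
    rw [hsp]
    have hrhs : ((List.range L.length).map (fpp left0 L E)).flatten
        = ((List.range (L.length - 1)).map (fpp left0 L E)).flatten
          ++ fpp left0 L E (L.length - 1) := by
      conv_lhs => rw [(by omega : L.length = (L.length - 1) + 1), List.range_succ]
      rw [List.map_append, List.flatten_append]
      simp
    rw [hrhs]
    rcases Nat.lt_or_ge L.length 2 with h1 | h2
    · -- a one-character line: no break possible
      have h1' : L.length - 1 = 0 := by omega
      rw [h1']
      simp only [List.range_zero, List.map_nil, List.flatten_nil, List.nil_append]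
      have hE'' : ∃ R, E = '\n' :: R := by
        rcases hE with h | h
        · exact h
        · exact absurd h.2 (by omega)
      obtain ⟨R, rfl⟩ := hE''
      have hfp : fpp left0 L ('\n' :: R) 0 = [L.getD 0 'X'] := by
        rw [fpp_zero]
        apply ruleR_noBullet_noLower
        · rintro ⟨-, -, hsp', -⟩
          rw [getD_append_ge L _ 1 (by omega), (by omega : 1 - L.length = 0),
            List.getD_cons_zero] at hsp'
          exact absurd hsp' (by decide)
        · rcases hl0 with rfl | rfl
          · exact pyStrIslower_empty
          · exact pyStrIslower_nl
      rw [hfp]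
      unfold breakFix
      refine if_neg ?_
      rintro ⟨-, -, -, hlow⟩
      rw [slice_n2_n1_short _ (by simp), pyStrIslower_empty] at hlow
      exact absurd hlow (by simp)
    · -- line of length ≥ 2
      have hw : ((List.range (L.length - 1)).map (fpp left0 L E)).flatten
          = ((List.range (L.length - 2)).map (fpp left0 L E)).flatten
            ++ [L.getD (L.length - 2) 'X'] := by
        conv_lhs => rw [(by omega : L.length - 1 = (L.length - 2) + 1), List.range_succ]
        rw [List.map_append, List.flatten_append]
        congr 1
        simp only [List.map_cons, List.map_nil, List.flatten_cons, List.flatten_nil,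
          List.append_nil]
        exact fppPen L E left0 (L.length - 2) hNL hE hl0 (by omega)
      rw [hw, List.append_assoc]
      rw [fppLast L E left0 (L.length - 1) hNL hE' (by omega) (by omega),
        (by omega : L.length - 1 - 1 = L.length - 2)]
      have hsplit : ∀ (w0 : List Char),
          w0 ++ ([L.getD (L.length - 2) 'X'] ++ [L.getD (L.length - 1) 'X'])
            = (w0 ++ [L.getD (L.length - 2) 'X']) ++ [L.getD (L.length - 1) 'X'] := by
        intro w0; rw [List.append_assoc]
      by_cases hcond : PySem.Chars.islower (L.getD (L.length - 2) 'X') = true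
          ∧ L.getD (L.length - 1) 'X' = ' '
          ∧ E.getD 0 'X' = '\n' ∧ E.getD 1 'X' = '\n'
      · rw [if_pos hcond]
        have hbc := hguard.mpr ⟨hcond.2.2.1, hcond.2.2.2⟩
        have hend' : PySem.Chars.endswith
            (((List.range (L.length - 2)).map (fpp left0 L E)).flatten
              ++ ([L.getD (L.length - 2) 'X'] ++ [L.getD (L.length - 1) 'X'])) [' '] = true := by
          rw [hsplit]
          exact (endswith_append_singleton _ _ _).mpr hcond.2.1
        have hlow' : pyStrIslower (PySem.List.slice
            (((List.range (L.length - 2)).map (fpp left0 L E)).flatten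
              ++ ([L.getD (L.length - 2) 'X'] ++ [L.getD (L.length - 1) 'X'])) (some (-2)) (some (-1))) = true := by
          simp only [List.singleton_append]
          rw [slice_n2_n1, pyStrIslower_singleton]
          exact hcond.1
        unfold breakFix
        rw [if_pos ⟨hbc.1, hbc.2, hend', hlow'⟩]
        rw [PySem.List.slice_to_neg_one, hsplit _, List.dropLast_concat, List.append_assoc]
      · rw [if_neg hcond]
        unfold breakFix
        refine Eq.trans (if_neg ?_) ?_
        · rintro ⟨hg1, hg2, hend, hlow⟩
          apply hcond
          have hg := hguard.mp ⟨hg1, hg2⟩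
          refine ⟨?_, ?_, hg.1, hg.2⟩
          · simp only [List.singleton_append] at hlow
            rw [slice_n2_n1, pyStrIslower_singleton] at hlow
            exact hlow
          · rw [hsplit] at hend
            exact (endswith_append_singleton _ _ _).mp hend
        · rw [List.append_assoc]


-- ---------- assembling the whole text from its lines ----------

lemma winSeg_newline (lft R : List Char) :
    winSeg [] lft ('\n' :: R) = '\n' :: winSeg [] ['\n'] R := by
  show ruleR lft '\n' ((R ++ []).getD 0 'X') ((R ++ []).getD 1 'X') ++ winSeg [] ['\n'] R = _
  rw [ruleR_plain _ _ _ _ (by refine ⟨?_, ?_, ?_, ?_, ?_⟩ <;> decide)]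
  rfl

lemma enumerate_nil {α : Type} (k : Int) : PySem.List.enumerate ([] : List α) k = [] := by
  rw [PySem.List.enumerate]

lemma mySplit_head_nil_iff (R : List Char) (hR : R ≠ []) :
    ((mySplit [] R)[0]? = some ([] : List Char)) ↔ R.getD 0 'X' = '\n' := by
  cases R with
  | nil => exact absurd rfl hR
  | cons c R' =>
    rw [List.getD_cons_zero]
    show ((mySplit [] (c :: R'))[0]? = some []) ↔ c = '\n'
    rw [mySplit]
    by_cases hc : c = '\n'
    · subst hc
      simp
    · rw [if_neg hc]
      obtain ⟨u, rest, hu⟩ := mySplit_head_shape R' ([] ++ [c])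
      rw [hu]
      simp [hc]

lemma Hx_tail (t L R : List Char) (hx : ['X', 'X', 'X'] <:+ t) (ht : t = L ++ '\n' :: R) :
    ['X', 'X', 'X'] <:+ R := by
  subst ht
  obtain ⟨u, hu⟩ := hx
  have hlen : u.length + 3 = L.length + 1 + R.length := by
    have h := congrArg List.length hu
    simp at h
    omega
  rcases Nat.lt_or_ge R.length 3 with hr | hr
  · exfalso
    have hpos : u.length ≤ L.length := by omega
    have h1 : (L ++ '\n' :: R)[L.length]? = some '\n' := by
      rw [List.getElem?_append_right (le_refl _)]
      simp
    have h2 : (L ++ '\n' :: R)[L.length]? = some 'X' := by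
      rw [← hu, List.getElem?_append_right hpos]
      have hk : L.length - u.length < 3 := by omega
      have hrep : (['X', 'X', 'X'] : List Char) = List.replicate 3 'X' := rfl
      rw [hrep, List.getElem?_replicate]
      rw [if_pos hk]
    rw [h1] at h2
    simp at h2
  · refine ⟨R.take (R.length - 3), ?_⟩
    have h1 : (u ++ ['X', 'X', 'X']).drop u.length = ['X', 'X', 'X'] := List.drop_left
    have h2 : (L ++ '\n' :: R) = (L ++ ['\n']) ++ R := by simp
    have h3 : (u ++ ['X', 'X', 'X']).drop u.length = R.drop (R.length - 3) := by
      rw [hu, h2, (show u.length = (L ++ ['\n']).length + (R.length - 3) by simp; omega)]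
      rw [List.drop_append]
      simp [List.drop_eq_nil_of_le]
    rw [h3] at h1
    rw [← h1, List.take_append_drop]

lemma main_join : ∀ (N : Nat) (t : List Char), t.length ≤ N →
    ['X', 'X', 'X'] <:+ t →
    ∀ (lines : List (List Char)) (i0 : Nat), lines.drop i0 = mySplit [] t →
    PySem.Chars.join ['\n'] ((PySem.List.enumerate (mySplit [] t) (i0 : Int)).map
        (fun p => breakFix lines p.1 (spaceFix (bulletFix p.1 p.2))))
      = winSeg [] (if i0 = 0 then [] else ['\n']) t := by
  intro N
  induction N with
  | zero =>
    intro t ht hx lines i0 hdrop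
    have := hx.length_le
    simp at this
    omega
  | succ N ihN =>
    intro t ht hx lines i0 hdrop
    have hl0 : (if i0 = 0 then ([] : List Char) else ['\n']) = [] ∨
        (if i0 = 0 then ([] : List Char) else ['\n']) = ['\n'] := by
      split_ifs
      · exact Or.inl rfl
      · exact Or.inr rfl
    have hi : (0 < (i0 : Int)) ↔ (if i0 = 0 then ([] : List Char) else ['\n']) = ['\n'] := by
      split_ifs with h
      · subst h
        constructor
        · intro hh; exact absurd hh (by omega)
        · intro hh; exact absurd hh (by simp)
      · constructor
        · intro _; rfl
        · intro _; omega
    by_cases hmem : '\n' ∈ t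
    · -- t = L ++ '\n' :: R  with  '\n' ∉ L
      have hdw : t.dropWhile (fun c => !(c == '\n')) ≠ [] := by
        intro hnil
        rw [List.dropWhile_eq_nil_iff] at hnil
        have := hnil '\n' hmem
        simp at this
      set L := t.takeWhile (fun c => !(c == '\n')) with hLdef
      set R := (t.dropWhile (fun c => !(c == '\n'))).tail with hRdef
      obtain ⟨c, r, hcr⟩ := List.exists_cons_of_ne_nil hdw
      have hc : c = '\n' := by
        have h := List.head_dropWhile_not (fun x => !(x == '\n')) hdw
        simp only [hcr, List.head_cons] at h
        simpa using h
      have hdwe : t.dropWhile (fun c => !(c == '\n')) = '\n' :: R := by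
        rw [hRdef, hcr, hc]
        rfl
      have hsplit : t = L ++ '\n' :: R := by
        conv_lhs => rw [← List.takeWhile_append_dropWhile (p := fun c => !(c == '\n')) (l := t)]
        rw [← hLdef, hdwe]
      have hNL : '\n' ∉ L := by
        intro hmemL
        have := List.mem_takeWhile_imp (hLdef ▸ hmemL)
        simp at this
      have hxR : ['X', 'X', 'X'] <:+ R := Hx_tail t L R hx hsplit
      have hRne : R ≠ [] := by
        intro hnil
        have := hxR.length_le
        rw [hnil] at this
        simp at this
      have hmys : mySplit [] t = L :: mySplit [] R := by
        conv_lhs => rw [hsplit]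
        rw [mySplit_append_newline L R [] hNL]
        rfl
      -- index bookkeeping
      have hlineslen : i0 + 1 < lines.length := by
        have h1 : (lines.drop i0).length = lines.length - i0 := List.length_drop
        rw [hdrop, hmys] at h1
        have h2 := mySplit_ne_nil R []
        have h3 : 1 ≤ (mySplit [] R).length := by
          cases hq : mySplit [] R
          · exact absurd hq h2
          · simp
        simp at h1
        omega
      have hdrop1 : lines.drop (i0 + 1) = mySplit [] R := by
        have h : (lines.drop i0).tail = lines.drop (i0 + 1) := by
          rw [← List.drop_one, List.drop_drop, Nat.add_comm]
        rw [← h, hdrop, hmys]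
        rfl
      have hguard : (((i0 : Int) + 1 < (lines.length : Int)) ∧
          PySem.List.pyGet? lines ((i0 : Int) + 1) = some ([] : List Char))
          ↔ (('\n' :: R).getD 0 'X' = '\n' ∧ ('\n' :: R).getD 1 'X' = '\n') := by
        rw [List.getD_cons_zero, List.getD_cons_succ]
        have hcast : ((i0 : Int) + 1) = ((i0 + 1 : Nat) : Int) := by push_cast; ring
        rw [hcast, PySem.List.pyGet?_natCast]
        have hget1 : lines[i0 + 1]? = (mySplit [] R)[0]? := by
          rw [← hdrop1]
          rw [List.getElem?_drop]
        rw [hget1]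
        constructor
        · rintro ⟨-, hg⟩
          exact ⟨rfl, (mySplit_head_nil_iff R hRne).mp hg⟩
        · rintro ⟨-, hg⟩
          refine ⟨by push_cast; omega, (mySplit_head_nil_iff R hRne).mpr hg⟩
      have hline := line_eq L ('\n' :: R) (if i0 = 0 then [] else ['\n']) (i0 : Int) lines
        (Or.inl ⟨R, rfl⟩) hNL hl0 hi hguard
      have htail := ihN R (by rw [hsplit] at ht; simp at ht; omega) hxR lines (i0 + 1) hdrop1
      rw [if_neg (by omega : ¬ i0 + 1 = 0)] at htail
      have hcast : ((i0 + 1 : Nat) : Int) = (i0 : Int) + 1 := by push_cast; ring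
      rw [hcast] at htail
      rw [hmys, enumerate_cons, List.map_cons]
      obtain ⟨q, rest2, hq⟩ : ∃ q rest2,
          (PySem.List.enumerate (mySplit [] R) ((i0 : Int) + 1)).map
            (fun p => breakFix lines p.1 (spaceFix (bulletFix p.1 p.2))) = q :: rest2 := by
        cases hmr : mySplit [] R with
        | nil => exact absurd hmr (mySplit_ne_nil R [])
        | cons a as =>
          rw [enumerate_cons]
          exact ⟨_, _, rfl⟩
      rw [hq, PySem.Chars.join_cons_cons, ← hq, htail, hline]
      conv_rhs => rw [hsplit]
      rw [winSeg_split, winSeg_newline, List.append_assoc]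
      rfl
    · -- last line of the text
      have hmys : mySplit [] t = [t] := mySplit_no_newline t [] hmem
      have hlen3 : 3 ≤ t.length := by
        have := hx.length_le
        simpa using this
      have hlines : lines.length = i0 + 1 := by
        have h1 : (lines.drop i0).length = lines.length - i0 := List.length_drop
        rw [hdrop, hmys] at h1
        simp at h1
        rcases Nat.lt_or_ge i0 lines.length with h | h
        · omega
        · rw [List.drop_eq_nil_of_le h] at hdrop
          rw [hmys] at hdrop
          exact absurd hdrop.symm (by simp)
      have hguard : (((i0 : Int) + 1 < (lines.length : Int)) ∧
          PySem.List.pyGet? lines ((i0 : Int) + 1) = some ([] : List Char))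
          ↔ (([] : List Char).getD 0 'X' = '\n' ∧ ([] : List Char).getD 1 'X' = '\n') := by
        constructor
        · rintro ⟨hlt, -⟩
          rw [hlines] at hlt
          exfalso
          push_cast at hlt
          omega
        · rintro ⟨hg, -⟩
          rw [List.getD_nil] at hg
          exact absurd hg (by decide)
      have hline := line_eq t [] (if i0 = 0 then [] else ['\n']) (i0 : Int) lines
        (Or.inr ⟨rfl, hlen3⟩) hmem hl0 hi hguard
      rw [hmys, enumerate_cons, List.map_cons, enumerate_nil, List.map_nil,
        PySem.Chars.join_singleton]
      have : winSeg [] (if i0 = 0 then [] else ['\n']) t = winSeg [] (if i0 = 0 then [] else ['\n']) t := rfl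
      calc _ = winSeg ([] : List Char) (if i0 = 0 then [] else ['\n']) t := hline
        _ = _ := rfl

-- ===== VERDICT (by name: the statement is the Claim_ definition above) =====
theorem cambiandoBullets_spec : Claim_equal_cambiandoBullets := by
  intro s _
  unfold Spec_cambiandoBullets
  rw [A_eq_flatten]
  have halt : cambiandoBullets_alt s = String.ofList (PySem.List.slice
      (PySem.Chars.join ['\n'] ((PySem.List.enumerate
        (PySem.Chars.splitOn (s.toList ++ "XXXX".toList) ['\n']) 0).map
        (fun p => breakFix (PySem.Chars.splitOn (s.toList ++ "XXXX".toList) ['\n']) p.1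
          (spaceFix (bulletFix p.1 p.2))))) none (some (-4))) := rfl
  rw [halt]
  have hXl : ("XXXX".toList : List Char) = ['X', 'X', 'X', 'X'] := rfl
  have hx : ['X', 'X', 'X'] <:+ (s.toList ++ "XXXX".toList) := by
    refine ⟨s.toList ++ ['X'], ?_⟩
    rw [hXl, List.append_assoc]
    rfl
  have hmain := main_join (s.toList ++ "XXXX".toList).length (s.toList ++ "XXXX".toList)
    le_rfl hx (mySplit [] (s.toList ++ "XXXX".toList)) 0 (by rw [List.drop_zero])
  rw [if_pos rfl] at hmain
  norm_num at hmain
  rw [splitOn_eq, hmain]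
  have hwin : winSeg [] ([] : List Char) (s.toList ++ "XXXX".toList)
      = ((List.range (s.toList ++ "XXXX".toList).length).map
          (procB (s.toList ++ "XXXX".toList))).flatten := by
    rw [winSeg_eq_flatten]
    exact congrArg List.flatten (List.map_congr_left (fun j _ => (procB_fpp _ j).symm))
  rw [hwin]
  have hlen : (s.toList ++ "XXXX".toList).length = s.toList.length + 4 := by simp
  rw [hlen, hXl, F_full s.toList]
  rw [PySem.List.slice_to_neg_ofNat _ 4 (by omega)]
  have hlen2 : ((((List.range s.toList.length).map
        (procB (s.toList ++ ['X', 'X', 'X', 'X']))).flatten ++ ['X', 'X', 'X', 'X']).length)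
      = (((List.range s.toList.length).map
        (procB (s.toList ++ ['X', 'X', 'X', 'X']))).flatten).length + 4 := by simp
  rw [hlen2, Nat.add_sub_cancel, List.take_left]
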